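-- pv_equiv track=rewrite | github.com/melodist/CodingPractice | src/Baekjoon/17609_Palindrome.py | solution
-- ===== SOURCE A (Python) =====
-- def is_palindrome(s):
--     if s == s[::-1]:
--         return True
--
-- def solution(s):
--     if is_palindrome(s):
--         return 0
--
--     i = 0
--     j = len(s) - 1
--
--     while i < j:
--         if s[i] != s[j]:
--             if is_palindrome(s[i + 1: j + 1]):
--                 return 1
--             elif is_palindrome(s[i: j]):
--                 return 1
--             else:
--                 return 2
--         i += 1
--         j -= 1
-- ===== SOURCE B (Python) =====
-- def solution(s):
--     # Recursive two-pointer judge with a one-deletion budget; no reversed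
--     # copies or slices are built.
--     def check(i, j, deletions_left):
--         while i < j and s[i] == s[j]:
--             i += 1
--             j -= 1
--         if i >= j:
--             return True
--         if deletions_left > 0:
--             return check(i + 1, j, 0) or check(i, j - 1, 0)
--         return False
--
--     if check(0, len(s) - 1, 0):
--         return 0
--     if check(0, len(s) - 1, 1):
--         return 1
--     return 2
-- ===== Notes on version B (the rewrite author's own statement) =====
-- stated objective: alternative
-- what changed: A tests whole-string and sliced copies against their reversals inside a while loop; B uses a single recursive two-pointer judge with a one-deletion budget and builds no reversed copies or slices.
import Mathlib
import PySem

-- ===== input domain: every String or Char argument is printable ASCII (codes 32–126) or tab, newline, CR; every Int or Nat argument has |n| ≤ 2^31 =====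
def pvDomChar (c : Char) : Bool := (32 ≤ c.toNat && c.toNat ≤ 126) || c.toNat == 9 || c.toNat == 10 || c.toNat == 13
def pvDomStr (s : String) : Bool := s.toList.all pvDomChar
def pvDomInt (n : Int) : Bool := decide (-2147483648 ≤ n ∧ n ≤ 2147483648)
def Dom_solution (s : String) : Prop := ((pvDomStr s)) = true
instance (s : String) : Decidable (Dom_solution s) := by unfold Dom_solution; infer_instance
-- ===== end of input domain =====

-- B replaces A's while-loop with reversed/sliced copies by a recursive two-pointer
-- judge carrying a one-deletion budget (objective: alternative decomposition).

-- ===== PORT A =====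
-- is_palindrome(s): s == s[::-1] (truthy True / falsy None ported as Bool)
def is_palindrome (l : List Char) : Bool :=
  match PySem.List.slice? l none none (-1) with
  | some r => l == r
  | none => false   -- unreachable: step -1 never yields none

-- the while loop of A
def loopA (l : List Char) (i j : Int) : Int :=
  if _h : i < j then
    match PySem.List.pyGet? l i, PySem.List.pyGet? l j with
    | some a, some b =>
      if a ≠ b then
        if is_palindrome (PySem.List.slice l (some (i + 1)) (some (j + 1))) then 1
        else if is_palindrome (PySem.List.slice l (some i) (some j)) then 1
        else 2
      else loopA l (i + 1) (j - 1)
    | _, _ => 0   -- unreachable: indices are in range whenever the loop runs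
  else 0   -- Python falls off and returns None here; unreachable: the loop only
           -- exhausts when l is a palindrome, and then 0 was returned above
termination_by (j - i).toNat
decreasing_by omega

def solution (s : String) : Int :=
  let l := s.toList
  if is_palindrome l then 0
  else loopA l 0 ((l.length : Int) - 1)

-- ===== PORT B =====
-- check(i, j, deletions_left) from Source B: the inner while is the a = b branch
def checkB (l : List Char) (i j : Int) (d : Int) : Bool :=
  if _h : i < j then
    match PySem.List.pyGet? l i, PySem.List.pyGet? l j with
    | some a, some b =>
      if a = b then checkB l (i + 1) (j - 1) d
      else if d > 0 then checkB l (i + 1) j 0 || checkB l i (j - 1) 0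
      else false
    | _, _ => false   -- unreachable: indices are in range whenever i < j here
  else true
termination_by (j - i).toNat
decreasing_by all_goals omega

def solution_alt (s : String) : Int :=
  let l := s.toList
  if checkB l 0 ((l.length : Int) - 1) 0 then 0
  else if checkB l 0 ((l.length : Int) - 1) 1 then 1
  else 2

-- ===== PRECONDITION & SPEC =====
def Spec_solution (s : String) (out : Int) : Prop := out = solution_alt s
instance (s : String) (out : Int) : Decidable (Spec_solution s out) := by unfold Spec_solution; infer_instance

-- ===== CLAIM (what is proved, stated in full; the proofs are below) =====
def Claim_equal_solution : Prop := ∀ (s : String), Dom_solution s → Spec_solution s (solution s)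

-- ===== LEMMAS AND PROOFS =====

theorem is_pal_eq (l : List Char) : is_palindrome l = (l == l.reverse) := by
  simp [is_palindrome, PySem.List.slice?_none_none_neg_one]

theorem short_pal {α : Type} (xs : List α) (h : xs.length ≤ 1) : xs.reverse = xs := by
  match xs with
  | [] => rfl
  | [a] => rfl
  | a :: b :: t => simp at h

theorem pal_cons_concat (x z : Char) (ys : List Char) :
    ((x :: (ys ++ [z])) = (x :: (ys ++ [z])).reverse) ↔ (x = z ∧ ys = ys.reverse) := by
  simp only [List.reverse_cons, List.reverse_append, List.reverse_cons, List.reverse_nil,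
    List.nil_append, List.cons_append, List.cons.injEq]
  constructor
  · rintro ⟨rfl, h⟩
    refine ⟨rfl, ?_⟩
    have := List.append_inj' h (by simp)
    exact this.1
  · rintro ⟨rfl, h⟩
    exact ⟨rfl, by rw [← h]⟩

-- one unfolding step of checkB / loopA when both indices are in range
theorem checkB_step (l : List Char) (i j d : Int) (hi : 0 ≤ i) (h : i < j)
    (hj : j < (l.length : Int)) :
    checkB l i j d =
      (if l[i.toNat]'(by omega) = l[j.toNat]'(by omega) then checkB l (i + 1) (j - 1) d
       else if d > 0 then checkB l (i + 1) j 0 || checkB l i (j - 1) 0 else false) := by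
  rw [checkB, dif_pos h, PySem.List.pyGet?_eq_some_getElem l hi (by omega),
      PySem.List.pyGet?_eq_some_getElem l (show (0:Int) ≤ j by omega) (by omega)]

theorem loopA_step (l : List Char) (i j : Int) (hi : 0 ≤ i) (h : i < j)
    (hj : j < (l.length : Int)) :
    loopA l i j =
      (if l[i.toNat]'(by omega) ≠ l[j.toNat]'(by omega) then
        (if is_palindrome (PySem.List.slice l (some (i + 1)) (some (j + 1))) then 1
         else if is_palindrome (PySem.List.slice l (some i) (some j)) then 1 else 2)
       else loopA l (i + 1) (j - 1)) := by
  rw [loopA, dif_pos h, PySem.List.pyGet?_eq_some_getElem l hi (by omega),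
      PySem.List.pyGet?_eq_some_getElem l (show (0:Int) ≤ j by omega) (by omega)]

-- checkB with an empty budget decides whether the slice l[i : j+1] is a palindrome
theorem checkB_zero_pal (l : List Char) (i j : Int) (hi : 0 ≤ i) (hj1 : -1 ≤ j)
    (hj : j < (l.length : Int)) :
    (checkB l i j 0 = true) ↔
      ((PySem.List.slice l (some i) (some (j + 1))) =
        (PySem.List.slice l (some i) (some (j + 1))).reverse) := by
  rw [PySem.List.slice_toNat _ hi (by omega)]
  by_cases h : i < j
  · have hiN : i.toNat < l.length := by omega
    have hjN : j.toNat < l.length := by omega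
    rw [checkB]
    rw [dif_pos h]
    rw [PySem.List.pyGet?_eq_some_getElem l hi (by omega),
        PySem.List.pyGet?_eq_some_getElem l (show (0:Int) ≤ j by omega) (by omega)]
    have hdec : (l.drop i.toNat).take ((j + 1).toNat - i.toNat) =
        l[i.toNat] :: (((l.drop (i.toNat + 1)).take (j.toNat - (i.toNat + 1))) ++ [l[j.toNat]]) := by
      rw [List.drop_eq_getElem_cons hiN]
      have h1 : (j + 1).toNat - i.toNat = (j.toNat - (i.toNat + 1)) + 1 + 1 := by omega
      rw [h1, List.take_succ_cons, List.take_add_one]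
      congr 1
      have hlen : j.toNat - (i.toNat + 1) < (l.drop (i.toNat + 1)).length := by
        rw [List.length_drop]; omega
      rw [List.getElem?_eq_getElem hlen]
      simp only [Option.toList_some, List.getElem_drop]
      simp only [show i.toNat + 1 + (j.toNat - (i.toNat + 1)) = j.toNat from by omega]
    rw [hdec, pal_cons_concat]
    have hys : (l.drop (i.toNat + 1)).take (j.toNat - (i.toNat + 1)) =
        (l.drop (i + 1).toNat).take ((j - 1 + 1).toNat - (i + 1).toNat) := by
      rw [show (j - 1 + 1).toNat - (i + 1).toNat = j.toNat - (i.toNat + 1) from by omega,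
          show (i + 1).toNat = i.toNat + 1 from by omega]
    by_cases hab : l[i.toNat] = l[j.toNat]
    · simp only [hab, if_true]
      rw [checkB_zero_pal l (i + 1) (j - 1) (by omega) (by omega) (by omega)]
      rw [PySem.List.slice_toNat _ (by omega) (by omega)]
      rw [hys, true_and]
    · simp only [if_neg hab]
      exact iff_of_false (by simp) (fun hc => hab hc.1)
  · rw [checkB]
    rw [dif_neg h]
    have hpal : ((l.drop i.toNat).take ((j + 1).toNat - i.toNat)).reverse
        = (l.drop i.toNat).take ((j + 1).toNat - i.toNat) := by
      apply short_pal
      simp only [List.length_take, List.length_drop]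
      omega
    exact iff_of_true rfl hpal.symm
termination_by (j - i).toNat
decreasing_by omega

-- when l[i : j+1] is not a palindrome, A's loop returns what B's budget-1 check decides
theorem loopA_eq (l : List Char) (i j : Int) (hi : 0 ≤ i) (hj1 : -1 ≤ j)
    (hj : j < (l.length : Int)) (hnp : checkB l i j 0 = false) :
    loopA l i j = (if checkB l i j 1 then 1 else 2) := by
  by_cases h : i < j
  · have hiN : i.toNat < l.length := by omega
    have hjN : j.toNat < l.length := by omega
    rw [loopA_step l i j hi h hj, checkB_step l i j 1 hi h hj]
    rw [checkB_step l i j 0 hi h hj] at hnp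
    by_cases hab : l[i.toNat] = l[j.toNat]
    · rw [if_neg (not_not_intro hab)]
      rw [if_pos hab] at hnp
      rw [if_pos hab]
      exact loopA_eq l (i + 1) (j - 1) (by omega) (by omega) (by omega) hnp
    · rw [if_pos hab, if_neg hab, if_pos (by norm_num : (1:Int) > 0)]
      have e1 : (checkB l (i + 1) j 0 = true) ↔
          ((PySem.List.slice l (some (i + 1)) (some (j + 1))) =
            (PySem.List.slice l (some (i + 1)) (some (j + 1))).reverse) :=
        checkB_zero_pal l (i + 1) j (by omega) (by omega) hj
      have e2 : (checkB l i (j - 1) 0 = true) ↔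
          ((PySem.List.slice l (some i) (some j)) =
            (PySem.List.slice l (some i) (some j)).reverse) := by
        have := checkB_zero_pal l i (j - 1) hi (by omega) (by omega)
        rwa [(by ring : j - 1 + 1 = j)] at this
      rw [is_pal_eq, is_pal_eq]
      by_cases p1 : (PySem.List.slice l (some (i + 1)) (some (j + 1))) =
          (PySem.List.slice l (some (i + 1)) (some (j + 1))).reverse
      · rw [if_pos (by simpa [beq_iff_eq] using p1), e1.mpr p1, Bool.true_or, if_pos rfl]
      · rw [if_neg (by simpa [beq_iff_eq] using p1)]
        have hb1 : checkB l (i + 1) j 0 = false := by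
          rcases Bool.eq_false_or_eq_true (checkB l (i + 1) j 0) with h0 | h0
          · exact absurd (e1.mp h0) p1
          · exact h0
        rw [hb1, Bool.false_or]
        by_cases p2 : (PySem.List.slice l (some i) (some j)) =
            (PySem.List.slice l (some i) (some j)).reverse
        · rw [if_pos (by simpa [beq_iff_eq] using p2), e2.mpr p2, if_pos rfl]
        · rw [if_neg (by simpa [beq_iff_eq] using p2)]
          have hb2 : checkB l i (j - 1) 0 = false := by
            rcases Bool.eq_false_or_eq_true (checkB l i (j - 1) 0) with h0 | h0
            · exact absurd (e2.mp h0) p2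
            · exact h0
          rw [hb2, if_neg (by simp)]
  · exfalso
    rw [checkB, dif_neg h] at hnp
    exact Bool.noConfusion hnp
termination_by (j - i).toNat
decreasing_by omega

theorem checkB_zero_full (l : List Char) :
    checkB l 0 ((l.length : Int) - 1) 0 = is_palindrome l := by
  have := checkB_zero_pal l 0 ((l.length : Int) - 1) (by omega) (by omega) (by omega)
  rw [(by ring : (l.length : Int) - 1 + 1 = (l.length : Int))] at this
  rw [PySem.List.slice_zero_start, PySem.List.slice_to_natCast, List.take_length] at this
  rw [Bool.eq_iff_iff, is_pal_eq]
  simpa using this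

-- ===== VERDICT (by name: the statement is the Claim_ definition above) =====
theorem solution_spec : Claim_equal_solution := by
  intro s _
  unfold Spec_solution solution solution_alt
  dsimp only
  generalize s.toList = l
  rw [checkB_zero_full]
  by_cases hp : is_palindrome l = true
  · simp [hp]
  · rw [if_neg hp, if_neg hp]
    exact loopA_eq l 0 ((l.length : Int) - 1) (by omega) (by omega) (by omega)
      (by rw [checkB_zero_full]; exact Bool.not_eq_true _ ▸ (by simpa using hp))
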